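-- pv_equiv track=rewrite | github.com/AngLi1997/laagent | la-agent-py/app/sensitive_word/sensitive_word_context.py | filter_sensitive_words
-- ===== SOURCE A (Python) =====
-- def filter_sensitive_words(text_list, sensitive_word, sym: str):
--     if not text_list:
--         return None
--
--     result = []
--     accumulated_text = ''
--     for current in text_list:
--         # 累积拼接
--         accumulated_text += current
--
--         # 检查是否命中敏感词
--         if sensitive_word in accumulated_text:
--             # 找出敏感词在累积文本中的起始位置
--             start_index = accumulated_text.find(sensitive_word)
--             if start_index != -1:
--                 # 敏感词覆盖范围：start_index 到 start_index + len(sensitive_word)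
--                 sensitive_range = set(range(start_index, start_index + len(sensitive_word)))
--                 # 构造当前项的替换结果
--                 modified_current = ''
--                 current_start = len(accumulated_text) - len(current)
--                 for i in range(len(current)):
--                     char_pos = current_start + i
--                     if char_pos in sensitive_range:
--                         modified_current += sym
--                     else:
--                         modified_current += current[i]
--                 result.append(modified_current)
--             else:
--                 result.append(current)
--         else:
--             result.append(current)
--     return result[-1] if result else None
-- ===== SOURCE B (Python) =====
-- def filter_sensitive_words(text_list, sensitive_word, sym: str):
--     if not text_list:
--         return None
--     total = ''.join(text_list)
--     last = text_list[-1]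
--     if sensitive_word not in total:
--         return last
--     start = total.find(sensitive_word)
--     cs = len(total) - len(last)
--     lo = max(start, cs)
--     hi = min(start + len(sensitive_word), cs + len(last))
--     if lo < hi:
--         return last[:lo - cs] + sym * (hi - lo) + last[hi - cs:]
--     return last
-- ===== Notes on version B (the rewrite author's own statement) =====
-- stated objective: faster
-- what changed: B joins the stream once and masks the last chunk by intersecting the interval [find, find+len(word)) with the last chunk's interval via two slices and sym*(hi-lo), instead of A's per-chunk re-accumulation, per-chunk substring search, position set and per-character rebuild.
import Mathlib
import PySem

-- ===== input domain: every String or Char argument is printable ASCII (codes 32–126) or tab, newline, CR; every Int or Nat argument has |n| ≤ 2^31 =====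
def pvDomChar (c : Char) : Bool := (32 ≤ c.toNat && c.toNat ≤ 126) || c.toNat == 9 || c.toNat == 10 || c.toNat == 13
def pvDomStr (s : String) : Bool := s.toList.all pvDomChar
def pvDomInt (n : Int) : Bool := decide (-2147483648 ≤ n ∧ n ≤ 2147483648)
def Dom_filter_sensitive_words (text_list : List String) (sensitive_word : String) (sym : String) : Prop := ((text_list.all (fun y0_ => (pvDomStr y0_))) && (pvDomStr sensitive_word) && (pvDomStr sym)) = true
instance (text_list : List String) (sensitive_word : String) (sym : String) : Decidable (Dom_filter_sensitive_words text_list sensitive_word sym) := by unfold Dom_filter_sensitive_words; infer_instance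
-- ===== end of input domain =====

-- B replaces A's per-chunk accumulation loop (re-concatenation, substring search and a
-- per-character rebuild with a position set, every iteration) by one join and a closed-form
-- interval intersection plus slicing of the last chunk (objective: faster, measured).


-- ===== PORT A =====
-- the loop body of A: state = (result, accumulated_text), both on List Char
def pvStepA (sensitive_word sym : List Char) (st : List (List Char) × List Char)
    (current : List Char) : List (List Char) × List Char :=
  let accumulated_text := st.2 ++ current
  if PySem.Chars.isIn sensitive_word accumulated_text then
    let start_index := PySem.Chars.find accumulated_text sensitive_word
    if start_index ≠ -1 then
      let sensitive_range :=
        PySem.Set.ofList (PySem.List.pyRange start_index (start_index + sensitive_word.length) 1)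
      let current_start : Int := (accumulated_text.length : Int) - (current.length : Int)
      let modified_current :=
        (PySem.List.pyRange 0 (current.length : Int) 1).foldl
          (fun m i =>
            let char_pos := current_start + i
            if PySem.Set.contains sensitive_range char_pos then m ++ sym
            else m ++ [PySem.List.pyGetD current i ' ']) []
      (st.1 ++ [modified_current], accumulated_text)
    else (st.1 ++ [current], accumulated_text)
  else (st.1 ++ [current], accumulated_text)

def filter_sensitive_words (text_list : List String) (sensitive_word : String) (sym : String) :
    Option String :=
  if text_list = [] then none
  else
    let result :=
      ((text_list.map String.toList).foldl (pvStepA sensitive_word.toList sym.toList) ([], [])).1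
    -- result[-1] if result else None
    (PySem.List.pyGet? result (-1)).map String.ofList

-- ===== PORT B =====
def filter_sensitive_words_alt (text_list : List String) (sensitive_word : String) (sym : String) :
    Option String :=
  if text_list = [] then none
  else
    let total := PySem.Chars.join [] (text_list.map String.toList)        -- ''.join(text_list)
    let last := PySem.List.pyGetD (text_list.map String.toList) (-1) []   -- text_list[-1]
    if PySem.Chars.isIn sensitive_word.toList total = false then some (String.ofList last)
    else
      let start := PySem.Chars.find total sensitive_word.toList
      let cs : Int := (total.length : Int) - (last.length : Int)
      let lo := max start cs
      let hi := min (start + (sensitive_word.toList.length : Int)) (cs + (last.length : Int))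
      if lo < hi then
        some (String.ofList
          (PySem.Chars.slice last none (some (lo - cs)) ++
           (List.replicate (hi - lo).toNat sym.toList).flatten ++   -- sym * (hi - lo)
           PySem.Chars.slice last (some (hi - cs)) none))
      else some (String.ofList last)

-- ===== PRECONDITION & SPEC =====
def Spec_filter_sensitive_words (text_list : List String) (sensitive_word : String) (sym : String) (out : Option String) : Prop := out = filter_sensitive_words_alt text_list sensitive_word sym
instance (text_list : List String) (sensitive_word : String) (sym : String) (out : Option String) : Decidable (Spec_filter_sensitive_words text_list sensitive_word sym out) := by unfold Spec_filter_sensitive_words; infer_instance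

-- ===== CLAIM (what is proved, stated in full; the proofs are below) =====
def Claim_equal_filter_sensitive_words : Prop := ∀ (text_list : List String) (sensitive_word : String) (sym : String), Dom_filter_sensitive_words text_list sensitive_word sym → Spec_filter_sensitive_words text_list sensitive_word sym (filter_sensitive_words text_list sensitive_word sym)

-- ===== LEMMAS AND PROOFS =====

-- the masked last chunk, written as structural recursion: positions i of cur with a ≤ i < b
-- (indices relative to the start of cur) are replaced by sym
def pvMaskGo (cur : List Char) (a b : Int) (sym : List Char) : List Char :=
  match cur with
  | [] => []
  | c :: rest => (if a ≤ 0 ∧ 0 < b then sym else [c]) ++ pvMaskGo rest (a - 1) (b - 1) sym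

-- what A's loop body appends for a chunk cur arriving after accumulated text a
def pvProc (sw sym a cur : List Char) : List Char :=
  if PySem.Chars.isIn sw (a ++ cur) then
    pvMaskGo cur (PySem.Chars.find (a ++ cur) sw - (a.length : Int))
      (PySem.Chars.find (a ++ cur) sw + (sw.length : Int) - (a.length : Int)) sym
  else cur

-- ''.join is flatten
theorem pv_join_nil (xss : List (List Char)) : PySem.Chars.join [] xss = xss.flatten := by
  induction xss with
  | nil => simp [PySem.Chars.join, List.intercalate]
  | cons h t ih => cases t <;> simp_all [PySem.Chars.join, List.intercalate, List.intersperse]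

-- accumulated_text after folding chunks l from state (r, a) is a ++ flatten l
theorem pvStepA_acc (sw sym : List Char) (l : List (List Char)) (r : List (List Char))
    (a : List Char) :
    (l.foldl (pvStepA sw sym) (r, a)).2 = a ++ l.flatten := by
  induction l generalizing r a with
  | nil => simp
  | cons x t ih =>
    have hstep : ∀ r' a', (pvStepA sw sym (r', a') x).2 = a' ++ x := by
      intro r' a'
      unfold pvStepA
      dsimp only
      split
      · split <;> rfl
      · rfl
    simp only [List.foldl_cons]
    rcases h : pvStepA sw sym (r, a) x with ⟨r1, a1⟩
    have := hstep r a
    rw [h] at this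
    simp only at this
    rw [ih, this, List.flatten_cons, List.append_assoc]

-- A's inner loop, written over List.range, is pvMaskGo
theorem pv_flatMap_mask (cur sym : List Char) (a b : Int) :
    (List.range cur.length).flatMap
      (fun (k : Nat) => if a ≤ (k : Int) ∧ (k : Int) < b then sym else [cur.getD k ' ']) =
    pvMaskGo cur a b sym := by
  induction cur generalizing a b with
  | nil => simp [pvMaskGo]
  | cons c rest ih =>
    rw [List.length_cons, List.range_succ_eq_map, List.flatMap_cons, List.flatMap_map]
    have hfun : (fun (k : Nat) =>
        if a ≤ (↑(Nat.succ k) : Int) ∧ (↑(Nat.succ k) : Int) < b then sym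
        else [(c :: rest).getD (Nat.succ k) ' ']) =
        (fun (k : Nat) => if a - 1 ≤ (k : Int) ∧ (k : Int) < b - 1 then sym
        else [rest.getD k ' ']) := by
      funext k
      rw [List.getD_cons_succ]
      refine if_congr ?_ rfl rfl
      push_cast
      omega
    rw [hfun, ih]
    have hhead : (if a ≤ ((0 : Nat) : Int) ∧ ((0 : Nat) : Int) < b then sym
        else [(c :: rest).getD 0 ' ']) = (if a ≤ 0 ∧ 0 < b then sym else [c]) := by
      refine if_congr ?_ rfl rfl
      push_cast
      exact Iff.rfl
    rw [pvMaskGo, hhead]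

-- A's per-character loop (absolute positions, set membership) equals pvMaskGo shifted by cs
theorem pv_loop_eq_maskGo (cur sym : List Char) (cs s e : Int) :
    (PySem.List.pyRange 0 (cur.length : Int) 1).foldl
      (fun m i =>
        if PySem.Set.contains (PySem.Set.ofList (PySem.List.pyRange s e 1)) (cs + i) then m ++ sym
        else m ++ [PySem.List.pyGetD cur i ' ']) [] =
    pvMaskGo cur (s - cs) (e - cs) sym := by
  rw [PySem.List.pyRange_zero_natCast, List.foldl_map]
  have hbody : (fun (m : List Char) (k : Nat) =>
      if PySem.Set.contains (PySem.Set.ofList (PySem.List.pyRange s e 1)) (cs + ↑k) then m ++ sym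
      else m ++ [PySem.List.pyGetD cur ↑k ' ']) =
      (fun (m : List Char) (k : Nat) =>
        m ++ (if s - cs ≤ (k : Int) ∧ (k : Int) < e - cs then sym else [cur.getD k ' '])) := by
    funext m k
    rw [PySem.List.pyGetD_natCast]
    have hcont : PySem.Set.contains (PySem.Set.ofList (PySem.List.pyRange s e 1)) (cs + ↑k)
        = decide (s - cs ≤ (k : Int) ∧ (k : Int) < e - cs) := by
      have h1 : (cs + (k : Int)) ∈ PySem.Set.ofList (PySem.List.pyRange s e 1)
          ↔ (s - cs ≤ (k : Int) ∧ (k : Int) < e - cs) := by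
        rw [PySem.Set.mem_ofList, PySem.List.mem_pyRange_one]
        omega
      simp [PySem.Set.contains, h1]
    rw [hcont]
    by_cases hP : s - cs ≤ (k : Int) ∧ (k : Int) < e - cs
    · simp [hP]
    · simp
      split <;> rfl
  rw [hbody, PySem.List.foldl_append_eq_flatMap]
  simp only [List.nil_append]
  exact pv_flatMap_mask cur sym (s - cs) (e - cs)

-- one step of A's fold, characterised
theorem pvStepA_eq (sw sym : List Char) (r : List (List Char)) (a cur : List Char) :
    pvStepA sw sym (r, a) cur = (r ++ [pvProc sw sym a cur], a ++ cur) := by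
  unfold pvStepA pvProc
  dsimp only
  by_cases hin : PySem.Chars.isIn sw (a ++ cur) = true
  · rw [if_pos hin, if_pos hin]
    have hfind : 0 ≤ PySem.Chars.find (a ++ cur) sw :=
      (PySem.Chars.find_nonneg_iff _ _).2 ((PySem.Chars.isIn_iff_infix _ _).1 hin)
    rw [if_pos (by omega : PySem.Chars.find (a ++ cur) sw ≠ -1)]
    rw [pv_loop_eq_maskGo cur sym (((a ++ cur).length : Int) - (cur.length : Int))]
    have hc : ((a ++ cur).length : Int) - (cur.length : Int) = (a.length : Int) := by
      rw [List.length_append]; push_cast; omega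
    rw [hc]
  · rw [if_neg hin, if_neg hin]

-- closed form of pvMaskGo: interval intersection + take/replicate/drop
theorem pv_maskGo_closed (cur sym : List Char) (a b : Int) :
    pvMaskGo cur a b sym =
      if max a 0 < min b (cur.length : Int) then
        cur.take (max a 0).toNat ++
          (List.replicate (min b (cur.length : Int) - max a 0).toNat sym).flatten ++
          cur.drop (min b (cur.length : Int)).toNat
      else cur := by
  induction cur generalizing a b with
  | nil => simp [pvMaskGo]
  | cons c rest ih =>
    rw [pvMaskGo, ih]
    by_cases h0 : a ≤ 0 ∧ 0 < b
    · rw [if_pos h0]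
      have hmax : max a 0 = 0 := by omega
      have hcond : max a 0 < min b ((c :: rest).length : Int) := by
        simp only [List.length_cons]; push_cast; omega
      have e2 : min b ((c :: rest).length : Int) = min (b - 1) (rest.length : Int) + 1 := by
        simp only [List.length_cons]; push_cast; omega
      by_cases h1 : max (a - 1) 0 < min (b - 1) (rest.length : Int)
      · rw [if_pos h1, if_pos hcond, hmax]
        have hm1 : max (a - 1) 0 = 0 := by omega
        rw [hm1]
        have e3 : (min b ((c :: rest).length : Int)).toNat
            = (min (b - 1) (rest.length : Int)).toNat + 1 := by rw [e2]; omega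
        have e4 : (min b ((c :: rest).length : Int) - 0).toNat
            = (min (b - 1) (rest.length : Int) - 0).toNat + 1 := by rw [e2]; omega
        rw [e3, e4, List.replicate_succ, List.flatten_cons, List.drop_succ_cons]
        simp
      · rw [if_neg h1, if_pos hcond, hmax]
        have hone : min b ((c :: rest).length : Int) = 1 := by
          simp only [List.length_cons] at *; push_cast at *; omega
        rw [hone]
        simp
    · rw [if_neg h0]
      by_cases hb : b ≤ 0
      · have h1 : ¬ max (a - 1) 0 < min (b - 1) (rest.length : Int) := by omega
        have h2 : ¬ max a 0 < min b ((c :: rest).length : Int) := by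
          simp only [List.length_cons]; push_cast; omega
        rw [if_neg h1, if_neg h2]
        rfl
      · have ha : 1 ≤ a := by omega
        by_cases hc : max a 0 < min b ((c :: rest).length : Int)
        · have h1 : max (a - 1) 0 < min (b - 1) (rest.length : Int) := by
            simp only [List.length_cons] at hc; push_cast at hc ⊢; omega
          rw [if_pos h1, if_pos hc]
          have e1 : (max a 0).toNat = (max (a - 1) 0).toNat + 1 := by omega
          have e2 : min b ((c :: rest).length : Int) = min (b - 1) (rest.length : Int) + 1 := by
            simp only [List.length_cons]; push_cast; omega
          have e3 : (min b ((c :: rest).length : Int)).toNat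
              = (min (b - 1) (rest.length : Int)).toNat + 1 := by rw [e2]; omega
          have e4 : (min b ((c :: rest).length : Int) - max a 0).toNat
              = (min (b - 1) (rest.length : Int) - max (a - 1) 0).toNat := by rw [e2]; omega
          rw [e1, e3, e4, List.take_succ_cons, List.drop_succ_cons]
          simp
        · have h1 : ¬ max (a - 1) 0 < min (b - 1) (rest.length : Int) := by
            simp only [List.length_cons] at hc; push_cast at hc ⊢; omega
          rw [if_neg h1, if_neg hc]
          rfl

-- the two ports agree on a nonempty list ys ++ [x]
theorem pv_main (ys : List String) (x : String) (sw sym : String) :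
    filter_sensitive_words (ys ++ [x]) sw sym = filter_sensitive_words_alt (ys ++ [x]) sw sym := by
  unfold filter_sensitive_words filter_sensitive_words_alt
  have hne : (ys ++ [x] : List String) ≠ [] := by simp
  rw [if_neg hne, if_neg hne]
  have hmap : (ys ++ [x]).map String.toList = ys.map String.toList ++ [x.toList] := by simp
  rw [hmap]
  have htot : PySem.Chars.join [] (ys.map String.toList ++ [x.toList])
      = (ys.map String.toList).flatten ++ x.toList := by
    rw [pv_join_nil]; simp
  rw [htot, PySem.List.pyGetD_neg_one_append_singleton]
  set A := (ys.map String.toList).flatten with hA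
  -- A's fold: last appended element is pvProc of the last chunk against the full join
  rw [List.foldl_append]
  rcases hst : (ys.map String.toList).foldl (pvStepA sw.toList sym.toList) ([], []) with ⟨r0, a0⟩
  have ha0 : a0 = A := by
    have h := pvStepA_acc sw.toList sym.toList (ys.map String.toList) [] []
    rw [hst] at h
    simpa using h
  subst ha0
  simp only [List.foldl_cons, List.foldl_nil, pvStepA_eq, PySem.List.pyGet?_neg_one_append_singleton,
    Option.map_some]
  -- now compare pvProc with B's interval formula
  unfold pvProc
  by_cases hin : PySem.Chars.isIn sw.toList (A ++ x.toList) = true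
  · rw [if_pos hin, if_neg (by simp [hin])]
    set st := PySem.Chars.find (A ++ x.toList) sw.toList with hstdef
    set L : Int := (sw.toList.length : Int)
    set n : Int := (x.toList.length : Int)
    have hCS : ((A ++ x.toList).length : Int) - n = (A.length : Int) := by
      rw [List.length_append]; push_cast; omega
    rw [hCS]
    set CS : Int := (A.length : Int)
    rw [pv_maskGo_closed]
    have hcond : (max (st - CS) 0 < min (st + L - CS) n) ↔ (max st CS < min (st + L) (CS + n)) := by
      omega
    by_cases hlt : max st CS < min (st + L) (CS + n)
    · rw [if_pos (hcond.2 hlt), if_pos hlt]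
      have h1 : (0 : Int) ≤ max st CS - CS := by omega
      have h2 : (0 : Int) ≤ min (st + L) (CS + n) - CS := by omega
      simp only [PySem.Chars.slice_eq_listSlice]
      rw [PySem.List.slice_to _ h1, PySem.List.slice_from _ h2]
      have e1 : (max (st - CS) 0).toNat = (max st CS - CS).toNat := by omega
      have e2 : (min (st + L - CS) n - max (st - CS) 0).toNat
          = (min (st + L) (CS + n) - max st CS).toNat := by omega
      have e3 : (min (st + L - CS) n).toNat = (min (st + L) (CS + n) - CS).toNat := by omega
      rw [e1, e2, e3]
    · rw [if_neg (fun h => hlt (hcond.1 h)), if_neg hlt]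
  · rw [if_neg hin, if_pos (by simpa using hin)]

-- ===== VERDICT (by name: the statement is the Claim_ definition above) =====
theorem filter_sensitive_words_spec : Claim_equal_filter_sensitive_words := by
  intro tl sw sym _
  unfold Spec_filter_sensitive_words
  rcases List.eq_nil_or_concat tl with rfl | ⟨ys, x, rfl⟩
  · rfl
  · rw [List.concat_eq_append]
    exact pv_main ys x sw sym
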